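-- pv_equiv track=rewrite | github.com/tamiralkateeb/intro-to-python | lesson_13/homework.py | find_best_recipe
-- ===== SOURCE A (Python) =====
-- def find_best_recipe(recipes, ingredients):
--     best_recipe = None
--     max_used_ingredients = 0
--     for recipe in recipes:
--         used_ingredients = [ingredient for ingredient in recipe if ingredient in ingredients]
--         if len(used_ingredients) > max_used_ingredients:
--             max_used_ingredients = len(used_ingredients)
--             best_recipe = recipe
--     return best_recipe
-- ===== SOURCE B (Python) =====
-- def find_best_recipe(recipes, ingredients):
--     have = set(ingredients)
--
--     def matches(recipe):
--         total = 0
--         for ing in recipe: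
--             if ing in have:
--                 total += 1
--         return total
--
--     ranked = sorted(recipes, key=matches, reverse=True)
--     if not ranked:
--         return None
--     best = ranked[0]
--     return best if matches(best) > 0 else None
-- ===== Notes on version B (the rewrite author's own statement) =====
-- stated objective: faster
-- what changed: Replaces A's single-pass running argmax (best-so-far pair updated on strictly greater count) with sort-then-select: stably sort the recipes by match count in descending order (counts via a set instead of A's O(I) inner list scan) and return the first element of the sorted list unless its count is 0.
import Mathlib
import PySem

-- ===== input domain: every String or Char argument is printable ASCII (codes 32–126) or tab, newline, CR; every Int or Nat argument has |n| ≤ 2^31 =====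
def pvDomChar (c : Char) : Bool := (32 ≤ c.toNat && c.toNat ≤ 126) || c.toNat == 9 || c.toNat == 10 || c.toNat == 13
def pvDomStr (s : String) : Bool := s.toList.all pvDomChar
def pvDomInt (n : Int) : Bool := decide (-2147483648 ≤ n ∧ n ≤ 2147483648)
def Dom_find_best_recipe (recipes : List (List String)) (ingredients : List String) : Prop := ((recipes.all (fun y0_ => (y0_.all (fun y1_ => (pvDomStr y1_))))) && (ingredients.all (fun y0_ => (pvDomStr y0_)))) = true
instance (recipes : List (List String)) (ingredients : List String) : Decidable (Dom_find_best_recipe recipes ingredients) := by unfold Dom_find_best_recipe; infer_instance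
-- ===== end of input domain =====

-- B replaces A's single-pass running argmax with sort-then-select: a stable descending sort of the
-- recipes by match count (set membership instead of A's inner list scan) and a check of its first
-- element; a timing run measured B faster.


-- ===== PORT A =====
def find_best_recipe (recipes : List (List String)) (ingredients : List String) : Option (List String) :=
  (recipes.foldl (fun (st : Option (List String) × Nat) recipe =>
      let used_ingredients := recipe.filter (fun ingredient => ingredients.contains ingredient)
      if used_ingredients.length > st.2 then (some recipe, used_ingredients.length) else st)
    (none, 0)).1

-- ===== PORT B =====
def find_best_recipe_alt (recipes : List (List String)) (ingredients : List String) : Option (List String) :=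
  let haveSet : PySem.Set String := PySem.Set.ofList ingredients
  let cnt : List String → Nat := fun recipe =>
    recipe.foldl (fun total ing => if PySem.Set.contains haveSet ing then total + 1 else total) 0
  let ranked := PySem.List.sorted recipes cnt true
  match ranked with
  | [] => none
  | best :: _ => if cnt best > 0 then some best else none

-- ===== PRECONDITION & SPEC =====
def Spec_find_best_recipe (recipes : List (List String)) (ingredients : List String) (out : Option (List String)) : Prop := out = find_best_recipe_alt recipes ingredients
instance (recipes : List (List String)) (ingredients : List String) (out : Option (List String)) : Decidable (Spec_find_best_recipe recipes ingredients out) := by unfold Spec_find_best_recipe; infer_instance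

-- ===== CLAIM (what is proved, stated in full; the proofs are below) =====
def Claim_equal_find_best_recipe : Prop := ∀ (recipes : List (List String)) (ingredients : List String), Dom_find_best_recipe recipes ingredients → Spec_find_best_recipe recipes ingredients (find_best_recipe recipes ingredients)

-- ===== LEMMAS AND PROOFS =====

-- the common match count (proof-only)
def pvC (ingredients : List String) (r : List String) : Nat :=
  (r.filter (fun ingredient => ingredients.contains ingredient)).length

-- B's counting loop computes pvC
theorem pvFoldl_count (p : String → Bool) (l : List String) (n : Nat) :
    l.foldl (fun n ing => if p ing then n + 1 else n) n = n + (l.filter p).length := by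
  induction l generalizing n with
  | nil => simp
  | cons x t ih =>
    by_cases hx : p x
    · simp [hx, ih]; omega
    · simp [hx, ih]

theorem pvContains_ofList (ingredients : List String) (x : String) :
    PySem.Set.contains (PySem.Set.ofList ingredients) x = ingredients.contains x := by
  simp only [PySem.Set.contains]
  by_cases h : x ∈ ingredients
  · simp [h, PySem.Set.mem_ofList]
  · simp [h, PySem.Set.mem_ofList]

-- head of the stable descending insertion sort, tracked by A's running-argmax pair
theorem pvInsert_foldl_head {α : Type} (key : α → Nat) (xs : List α) (h : α) (t : List α)
    (hmax : ∀ y ∈ t, key y ≤ key h) :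
    (xs.foldl (fun acc x => PySem.List.insertBy (fun a b => decide (key b < key a)) x acc) (h :: t)).head?
      = some ((xs.foldl (fun (st : α × Nat) x => if key x > st.2 then (x, key x) else st) (h, key h)).1) := by
  induction xs generalizing h t with
  | nil => simp
  | cons x xs ih =>
    simp only [List.foldl_cons, PySem.List.insertBy]
    by_cases hx : key h < key x
    · rw [if_pos (by simpa using hx)]
      have hgt : key x > key h := hx
      rw [if_pos hgt]
      exact ih x (h :: t) (by
        intro y hy
        rcases List.mem_cons.mp hy with rfl | hy
        · exact Nat.le_of_lt hx
        · exact Nat.le_of_lt (Nat.lt_of_le_of_lt (hmax y hy) hx))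
    · rw [if_neg (by simpa using hx)]
      have hngt : ¬ key x > key h := hx
      rw [if_neg hngt]
      exact ih h (PySem.List.insertBy (fun a b => decide (key b < key a)) x t) (by
        intro y hy
        rcases (PySem.List.mem_insertBy _ _ y t).mp hy with rfl | hy
        · exact Nat.le_of_not_lt hx
        · exact hmax y hy)

-- A's Option-valued fold in terms of the pair fold, for any seed consistent with its key
theorem pvFold_pair {α : Type} (key : α → Nat) (xs : List α) (a : α) (k : Nat) (hk : key a = k) :
    (xs.foldl (fun (st : Option α × Nat) x => if key x > st.2 then (some x, key x) else st)
        ((if 0 < k then some a else none), k)).1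
      = (if 0 < key (xs.foldl (fun (st : α × Nat) x => if key x > st.2 then (x, key x) else st) (a, k)).1
          then some (xs.foldl (fun (st : α × Nat) x => if key x > st.2 then (x, key x) else st) (a, k)).1
          else none) := by
  induction xs generalizing a k with
  | nil => simp [← hk]
  | cons x xs ih =>
    simp only [List.foldl_cons]
    by_cases hx : key x > k
    · rw [if_pos hx, if_pos hx]
      have h0 : 0 < key x := Nat.lt_of_le_of_lt (Nat.zero_le k) hx
      have : (if 0 < key x then some x else none) = some x := if_pos h0
      rw [← this]
      exact ih x (key x) rfl
    · rw [if_neg hx, if_neg hx]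
      exact ih a k hk

-- ===== VERDICT (by name: the statement is the Claim_ definition above) =====
theorem find_best_recipe_spec : Claim_equal_find_best_recipe := by
  intro recipes ingredients _
  unfold Spec_find_best_recipe find_best_recipe find_best_recipe_alt
  have hkey : (fun recipe : List String =>
      recipe.foldl (fun total ing =>
        if PySem.Set.contains (PySem.Set.ofList ingredients) ing then total + 1 else total) 0)
      = pvC ingredients := by
    funext r
    rw [pvFoldl_count, Nat.zero_add, pvC,
      List.filter_congr (fun a _ => pvContains_ofList ingredients a)]
  simp only [hkey]
  cases recipes with
  | nil => rfl
  | cons r0 rs =>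
    set key := pvC ingredients with hkeydef
    -- the sorted list's head via the pair fold
    have hsort := PySem.List.sorted_rev_eq_foldl_insertBy (r0 :: rs) key
    have hfirst : List.foldl (fun acc x => PySem.List.insertBy (fun a b => decide (key b < key a)) x acc)
        ([] : List (List String)) (r0 :: rs)
        = List.foldl (fun acc x => PySem.List.insertBy (fun a b => decide (key b < key a)) x acc) [r0] rs := by
      simp [PySem.List.insertBy]
    have hhead : (PySem.List.sorted (r0 :: rs) key true).head?
        = some ((rs.foldl (fun (st : List String × Nat) x => if key x > st.2 then (x, key x) else st) (r0, key r0)).1) := by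
      rw [hsort, hfirst]
      exact pvInsert_foldl_head key rs r0 [] (by simp)
    -- A's fold over r0 :: rs: first step normalised, then pvFold_pair
    have hA1 : ((r0 :: rs).foldl (fun (st : Option (List String) × Nat) x =>
          if key x > st.2 then (some x, key x) else st) (none, 0))
        = (rs.foldl (fun (st : Option (List String) × Nat) x =>
          if key x > st.2 then (some x, key x) else st) ((if 0 < key r0 then some r0 else none), key r0)) := by
      simp only [List.foldl_cons]
      by_cases h0 : key r0 > 0
      · rw [if_pos h0, if_pos h0]
      · rw [if_neg h0, if_neg h0]
        have : key r0 = 0 := Nat.eq_zero_of_not_pos h0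
        rw [this]
    obtain ⟨tl, htl⟩ : ∃ tl, PySem.List.sorted (r0 :: rs) key true
        = (rs.foldl (fun (st : List String × Nat) x => if key x > st.2 then (x, key x) else st) (r0, key r0)).1 :: tl := by
      cases hc : PySem.List.sorted (r0 :: rs) key true with
      | nil => rw [hc] at hhead; simp at hhead
      | cons m t =>
        rw [hc] at hhead
        simp only [List.head?_cons, Option.some.injEq] at hhead
        exact ⟨t, by rw [hhead]⟩
    have hC : ∀ r : List String,
        (List.filter (fun ingredient => ingredients.contains ingredient) r).length = key r :=
      fun r => rfl
    simp only [hC]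
    rw [hA1, pvFold_pair key rs r0 (key r0) rfl, htl]
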